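-- pv_equiv track=rewrite | github.com/zmylol/step4-5 | step 5/medical_column_selector/agents/column_selector.py | _first_unmatched_sample
-- ===== SOURCE A (Python) =====
-- from typing import Any, Dict, Iterable, List, Optional
--
-- def _first_unmatched_sample(normalization_info: Dict[str, Any]) -> List[str]:
--     """挑一小部分未匹配列名用于错误提示。"""
--     samples: List[str] = []
--     for key in [
--         "must_have_unmatched",
--         "useful_unmatched",
--         "maybe_unmatched",
--         "drop_unmatched",
--         "reason_unmatched",
--         "transform_unmatched",
--     ]:
--         for item in normalization_info.get(key, []):
--             if item not in samples:
--                 samples.append(item)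
--             if len(samples) >= 5:
--                 return samples
--     return samples
-- ===== SOURCE B (Python) =====
-- def _first_unmatched_sample(normalization_info):
--     """挑一小部分未匹配列名用于错误提示。"""
--     keys = [
--         "must_have_unmatched",
--         "useful_unmatched",
--         "maybe_unmatched",
--         "drop_unmatched",
--         "reason_unmatched",
--         "transform_unmatched",
--     ]
--     flat = [item for key in keys for item in normalization_info.get(key, [])]
--     return list(dict.fromkeys(flat))[:5]
-- ===== Notes on version B (the rewrite author's own statement) =====
-- stated objective: idiomatic
-- what changed: Replaces the nested loop with list-membership dedup and a mid-loop early return by a single flatten / dict.fromkeys dedup / [:5] slice pipeline.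
import Mathlib
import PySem

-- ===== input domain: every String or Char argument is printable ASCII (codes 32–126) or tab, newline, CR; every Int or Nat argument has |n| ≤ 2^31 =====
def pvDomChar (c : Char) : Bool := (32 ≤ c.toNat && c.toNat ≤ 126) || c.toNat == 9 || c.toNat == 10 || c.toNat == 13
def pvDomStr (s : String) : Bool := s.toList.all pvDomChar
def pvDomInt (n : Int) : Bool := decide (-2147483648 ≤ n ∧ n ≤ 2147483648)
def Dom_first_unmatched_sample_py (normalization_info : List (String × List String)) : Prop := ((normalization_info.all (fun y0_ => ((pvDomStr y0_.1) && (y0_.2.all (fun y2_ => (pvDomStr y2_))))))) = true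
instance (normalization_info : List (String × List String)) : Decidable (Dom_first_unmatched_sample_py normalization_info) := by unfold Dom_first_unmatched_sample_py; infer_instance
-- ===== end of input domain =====

-- B changes structure only: one flatten / ordered-dedup / take-5 pipeline instead of A's
-- nested loops with membership test and mid-loop early return (objective: idiomatic).

-- ===== PORT A =====
-- the six keys A iterates over
def pvKeys : List String :=
  ["must_have_unmatched", "useful_unmatched", "maybe_unmatched",
   "drop_unmatched", "reason_unmatched", "transform_unmatched"]

-- normalization_info.get(key, []) — first-match lookup on the association list
def pvGet (ni : List (String × List String)) (k : String) : List String :=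
  PySem.Dict.getD (PySem.Dict.mk ni) k []

-- inner 'for item in …' loop; Bool = the early 'return samples' was taken
def pvInner : List String → List String → List String × Bool
  | samples, [] => (samples, false)
  | samples, item :: rest =>
      let s := if samples.contains item then samples else samples ++ [item]
      if 5 ≤ s.length then (s, true) else pvInner s rest

-- outer 'for key in […]' loop
def pvOuter (ni : List (String × List String)) : List String → List String → List String
  | samples, [] => samples
  | samples, k :: ks =>
      match pvInner samples (pvGet ni k) with
      | (s, true) => s
      | (s, false) => pvOuter ni s ks

def first_unmatched_sample_py (normalization_info : List (String × List String)) : List String :=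
  pvOuter normalization_info [] pvKeys

-- ===== PORT B =====
def first_unmatched_sample_py_alt (normalization_info : List (String × List String)) : List String :=
  -- flat = [item for key in keys for item in ni.get(key, [])]; list(dict.fromkeys(flat))[:5]
  (PySem.List.dedup (pvKeys.flatMap (fun k => pvGet normalization_info k))).take 5

-- ===== PRECONDITION & SPEC =====
def Spec_first_unmatched_sample_py (normalization_info : List (String × List String)) (out : List String) : Prop := out = first_unmatched_sample_py_alt normalization_info
instance (normalization_info : List (String × List String)) (out : List String) : Decidable (Spec_first_unmatched_sample_py normalization_info out) := by unfold Spec_first_unmatched_sample_py; infer_instance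

-- ===== CLAIM (what is proved, stated in full; the proofs are below) =====
def Claim_equal_first_unmatched_sample_py : Prop := ∀ (normalization_info : List (String × List String)), Dom_first_unmatched_sample_py normalization_info → Spec_first_unmatched_sample_py normalization_info (first_unmatched_sample_py normalization_info)

-- ===== LEMMAS AND PROOFS =====

-- A's conditional append is Set.add
theorem pv_step_eq_add (s : List String) (x : String) :
    (if s.contains x then s else s ++ [x]) = PySem.Set.add s x := by
  rw [PySem.Set.add_eq_ite]
  by_cases h : x ∈ s <;> simp [h]

theorem pv_update_take_of_le (s : List String) (xs : List String) (h : 5 ≤ s.length) :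
    (PySem.Set.update s xs).take 5 = s.take 5 := by
  rw [PySem.Set.update_eq_append_filter, List.take_append_of_le_length h]

theorem pv_le_length_update (s : List String) (xs : List String) :
    s.length ≤ (PySem.Set.update s xs).length := by
  rw [PySem.Set.update_eq_append_filter]; simp

-- the inner loop is: dedupe-extend, truncate to 5, and report whether 5 was reached
theorem pv_inner_eq (xs : List String) (s : List String) (h : s.length < 5) :
    pvInner s xs = ((PySem.Set.update s xs).take 5, decide (5 ≤ (PySem.Set.update s xs).length)) := by
  induction xs generalizing s with
  | nil =>
      have h5 : ¬ (5 ≤ s.length) := by omega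
      simp [pvInner, PySem.Set.update_nil, List.take_of_length_le (le_of_lt h), h5]
  | cons x rest ih =>
      rw [PySem.Set.update_cons]
      have hlen : (PySem.Set.add s x).length ≤ s.length + 1 := by
        rw [PySem.Set.add_eq_ite]; by_cases hm : x ∈ s <;> simp [hm]
      simp only [pvInner, pv_step_eq_add]
      by_cases h5 : 5 ≤ (PySem.Set.add s x).length
      · have heq : (PySem.Set.add s x).length = 5 := by omega
        have hge : 5 ≤ (PySem.Set.update (PySem.Set.add s x) rest).length :=
          le_trans (le_of_eq heq.symm) (pv_le_length_update _ _)
        rw [if_pos h5]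
        rw [pv_update_take_of_le _ _ h5, List.take_of_length_le (le_of_eq heq)]
        simp [hge]
      · rw [if_neg h5]
        exact ih _ (by omega)

-- the outer loop on the remaining keys is: dedupe-extend by the flattened values, truncate to 5
theorem pv_outer_eq (ks : List String) (ni : List (String × List String)) (s : List String)
    (h : s.length < 5) :
    pvOuter ni s ks = (PySem.Set.update s (ks.flatMap (fun k => pvGet ni k))).take 5 := by
  induction ks generalizing s with
  | nil => simp [pvOuter, PySem.Set.update_nil, List.take_of_length_le (le_of_lt h)]
  | cons k ks ih =>
      rw [List.flatMap_cons, PySem.Set.update_append]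
      simp only [pvOuter, pv_inner_eq (pvGet ni k) s h]
      by_cases h5 : 5 ≤ (PySem.Set.update s (pvGet ni k)).length
      · simp only [decide_eq_true h5]
        rw [pv_update_take_of_le _ _ h5]
      · have hd : decide (5 ≤ (PySem.Set.update s (pvGet ni k)).length) = false := by
          simp [h5]
        simp only [hd]
        rw [List.take_of_length_le (by omega)]
        exact ih _ (by omega)

-- ===== VERDICT (by name: the statement is the Claim_ definition above) =====
theorem first_unmatched_sample_py_spec : Claim_equal_first_unmatched_sample_py := by
  intro ni _
  show first_unmatched_sample_py ni = first_unmatched_sample_py_alt ni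
  rw [first_unmatched_sample_py, first_unmatched_sample_py_alt,
      pv_outer_eq pvKeys ni [] (by simp), PySem.List.dedup_eq_ofList,
      ← PySem.Set.update_nil_left]
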